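-- pv_equiv track=rewrite | github.com/Presto-bit/aipodcast | services/orchestrator/app/clip_suggestions_llm.py | _is_consecutive_same_token
-- ===== SOURCE A (Python) =====
-- def _is_consecutive_same_token(
--     id_order: list[str],
--     subset: list[str],
--     id_to_tok: dict[str, str],
-- ) -> bool:
--     if len(subset) < 2:
--         return False
--     idx_map = {wid: i for i, wid in enumerate(id_order)}
--     order_w = sorted([w for w in subset if w in idx_map], key=lambda w: idx_map[w])
--     if len(order_w) != len(subset):
--         return False
--     positions = [idx_map[w] for w in order_w]
--     for a, b in zip(positions, positions[1:]):
--         if b != a + 1: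
--             return False
--     toks = [id_to_tok.get(w, "") for w in order_w]
--     return len(toks) >= 2 and len(set(toks)) == 1
-- ===== SOURCE B (Python) =====
-- def _is_consecutive_same_token(
--     id_order: list[str],
--     subset: list[str],
--     id_to_tok: dict[str, str],
-- ) -> bool:
--     if len(subset) < 2:
--         return False
--     idx_map = {wid: i for i, wid in enumerate(id_order)}
--     positions = []
--     for w in subset:
--         if w not in idx_map:
--             return False
--         positions.append(idx_map[w])
--     if len(set(positions)) != len(positions):
--         return False
--     if max(positions) - min(positions) != len(positions) - 1:
--         return False
--     tok0 = id_to_tok.get(subset[0], "")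
--     return all(id_to_tok.get(w, "") == tok0 for w in subset)
-- ===== Notes on version B (the rewrite author's own statement) =====
-- stated objective: faster
-- what changed: B replaces A's sort-by-index plus adjacent-pair scan with a single pass collecting positions (failing fast on a missing id) and an arithmetic consecutiveness test: positions are consecutive iff they are distinct and max-min equals len-1; tokens are compared against the first subset element's token instead of via a set.
import Mathlib
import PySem

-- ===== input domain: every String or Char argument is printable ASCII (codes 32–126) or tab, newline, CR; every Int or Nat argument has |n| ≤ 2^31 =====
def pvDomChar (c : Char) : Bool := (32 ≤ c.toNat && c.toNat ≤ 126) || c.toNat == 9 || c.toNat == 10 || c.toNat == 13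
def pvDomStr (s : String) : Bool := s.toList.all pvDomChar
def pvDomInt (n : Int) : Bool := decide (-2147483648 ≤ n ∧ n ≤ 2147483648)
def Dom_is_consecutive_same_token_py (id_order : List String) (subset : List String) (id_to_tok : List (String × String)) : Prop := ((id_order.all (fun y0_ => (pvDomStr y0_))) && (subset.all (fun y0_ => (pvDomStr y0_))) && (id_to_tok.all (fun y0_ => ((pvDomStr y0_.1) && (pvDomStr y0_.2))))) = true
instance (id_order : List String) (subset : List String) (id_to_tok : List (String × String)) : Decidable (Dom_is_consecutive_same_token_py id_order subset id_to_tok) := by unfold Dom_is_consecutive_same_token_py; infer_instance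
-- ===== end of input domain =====

-- B replaces A's sort-by-index + adjacent-pair scan by a single collecting pass and the
-- arithmetic test "positions distinct and max-min = len-1"; a timing run measured B faster.

-- ===== PORT A =====
-- idx_map = {wid: i for i, wid in enumerate(id_order)}
def pvIdxMap (id_order : List String) : PySem.Dict String Int :=
  (PySem.List.enumerate id_order 0).foldl (fun d p => d.insert p.2 p.1) PySem.Dict.empty

def is_consecutive_same_token_py (id_order : List String) (subset : List String) (id_to_tok : List (String × String)) : Bool :=
  if subset.length < 2 then false
  else
    let idx_map := pvIdxMap id_order
    -- sorted([w for w in subset if w in idx_map], key=lambda w: idx_map[w])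
    -- (idx_map[w] is ported as getD w 0: every sorted element passed the membership filter, so the default is never the value)
    let order_w := PySem.List.sorted (subset.filter (fun w => idx_map.contains w)) (fun w => idx_map.getD w 0) false
    if order_w.length ≠ subset.length then false
    else
      let positions := order_w.map (fun w => idx_map.getD w 0)
      -- for a, b in zip(positions, positions[1:]): if b != a + 1: return False
      if (positions.zip (PySem.List.slice positions (some 1) none)).all (fun p => p.2 == p.1 + 1) then
        let toks := order_w.map (fun w => (PySem.Dict.ofList id_to_tok).getD w "")
        decide (2 ≤ toks.length) && ((PySem.Set.ofList toks).length == 1)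
      else false

-- ===== PORT B =====
-- the position-collecting loop of B: returns none at the first subset id absent from idx_map
def pvCollectPositions (m : PySem.Dict String Int) : List String → Option (List Int)
  | [] => some []
  | w :: ws =>
    match m.get? w with
    | none => none
    | some i => (pvCollectPositions m ws).map (fun ps => i :: ps)

def is_consecutive_same_token_py_alt (id_order : List String) (subset : List String) (id_to_tok : List (String × String)) : Bool :=
  if subset.length < 2 then false
  else
    let idx_map := pvIdxMap id_order
    match pvCollectPositions idx_map subset with
    | none => false
    | some positions =>
      if (PySem.Set.ofList positions).length ≠ positions.length then false
      else
        match PySem.List.max? positions (fun x => x), PySem.List.min? positions (fun x => x) with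
        | some mx, some mn =>
          if mx - mn ≠ (positions.length : Int) - 1 then false
          else
            let tok0 := (PySem.Dict.ofList id_to_tok).getD (PySem.List.pyGetD subset 0 "") ""
            subset.all (fun w => (PySem.Dict.ofList id_to_tok).getD w "" == tok0)
        | _, _ => false  -- unreachable: positions is nonempty here (len(subset) ≥ 2)

-- ===== PRECONDITION & SPEC =====
def Spec_is_consecutive_same_token_py (id_order : List String) (subset : List String) (id_to_tok : List (String × String)) (out : Bool) : Prop := out = is_consecutive_same_token_py_alt id_order subset id_to_tok
instance (id_order : List String) (subset : List String) (id_to_tok : List (String × String)) (out : Bool) : Decidable (Spec_is_consecutive_same_token_py id_order subset id_to_tok out) := by unfold Spec_is_consecutive_same_token_py; infer_instance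

-- ===== CLAIM (what is proved, stated in full; the proofs are below) =====
def Claim_equal_is_consecutive_same_token_py : Prop := ∀ (id_order : List String) (subset : List String) (id_to_tok : List (String × String)), Dom_is_consecutive_same_token_py id_order subset id_to_tok → Spec_is_consecutive_same_token_py id_order subset id_to_tok (is_consecutive_same_token_py id_order subset id_to_tok)

-- ===== LEMMAS AND PROOFS =====

theorem pvCollect_none_iff (m : PySem.Dict String Int) (ws : List String) :
    pvCollectPositions m ws = none ↔ ∃ w ∈ ws, m.contains w = false := by
  induction ws with
  | nil => simp [pvCollectPositions]
  | cons w ws ih =>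
    simp only [pvCollectPositions]
    cases hg : m.get? w with
    | none =>
      constructor
      · intro _; exact ⟨w, by simp, by rw [PySem.Dict.contains_eq_isSome_get?, hg]; rfl⟩
      · intro _; rfl
    | some i =>
      have hc : m.contains w = true := by rw [PySem.Dict.contains_eq_isSome_get?, hg]; rfl
      simp only [Option.map_eq_none_iff, ih, List.mem_cons]
      constructor
      · rintro ⟨x, hx, hcx⟩; exact ⟨x, Or.inr hx, hcx⟩
      · rintro ⟨x, hx | hx, hcx⟩
        · subst hx; rw [hc] at hcx; cases hcx
        · exact ⟨x, hx, hcx⟩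
      
theorem pvCollect_all (m : PySem.Dict String Int) (ws : List String)
    (h : ∀ w ∈ ws, m.contains w = true) :
    pvCollectPositions m ws = some (ws.map (fun w => m.getD w 0)) := by
  induction ws with
  | nil => rfl
  | cons w ws ih =>
    have hc := h w (by simp)
    rw [PySem.Dict.contains_eq_isSome_get?] at hc
    obtain ⟨i, hi⟩ := Option.isSome_iff_exists.mp hc
    simp only [pvCollectPositions, hi, ih (fun x hx => h x (List.mem_cons_of_mem _ hx)), Option.map_some,
      List.map_cons, PySem.Dict.getD_of_get?_eq_some _ _ hi]

theorem pvSetLen_eq_iff (P : List Int) :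
    (PySem.Set.ofList P).length = P.length ↔ P.Nodup := by
  constructor
  · intro h
    have h1 : (PySem.Set.ofList P).toFinset = P.toFinset := by
      ext x; simp [List.mem_toFinset, PySem.Set.mem_ofList]
    have h2 := List.toFinset_card_of_nodup (PySem.Set.nodup_ofList P)
    rw [h1, List.card_toFinset] at h2
    have h3 : P.dedup.length = P.length := by omega
    have := (List.dedup_sublist P).eq_of_length h3
    rw [← this]; exact List.nodup_dedup P
  · intro h; rw [PySem.Set.ofList_eq_self_of_nodup _ h]

theorem pvSetLen_one_iff {α : Type} [DecidableEq α] (l : List α) (hne : l ≠ []) :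
    (PySem.Set.ofList l).length = 1 ↔ ∃ c, ∀ x ∈ l, x = c := by
  constructor
  · intro h
    obtain ⟨c, hc⟩ : ∃ c, PySem.Set.ofList l = [c] := by
      cases hs : PySem.Set.ofList l with
      | nil => rw [hs] at h; cases h
      | cons a t => cases t with
        | nil => exact ⟨a, rfl⟩
        | cons b t' => rw [hs] at h; simp at h
    exact ⟨c, fun x hx => by
      have : x ∈ PySem.Set.ofList l := (PySem.Set.mem_ofList l x).mpr hx
      rw [hc] at this; simpa using this⟩
  · rintro ⟨c, hc⟩
    have hmem : ∀ x, x ∈ PySem.Set.ofList l ↔ x = c := by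
      intro x
      constructor
      · intro hx; exact hc x ((PySem.Set.mem_ofList l x).mp hx)
      · rintro rfl
        rw [PySem.Set.mem_ofList]
        cases l with
        | nil => exact absurd rfl hne
        | cons a t => rw [← hc a (by simp)]; simp
    have hnd := PySem.Set.nodup_ofList l
    cases hs : PySem.Set.ofList l with
    | nil => exact absurd ((hmem c).mpr rfl) (by rw [hs]; simp)
    | cons a t =>
      cases t with
      | nil => rfl
      | cons b t' =>
        rw [hs] at hnd hmem
        have ha : a = c := (hmem a).mp (by simp)
        have hb : b = c := (hmem b).mp (by simp)
        subst ha; subst hb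
        simp at hnd

theorem pvZipAll_iff_chain (Q : List Int) :
    ((Q.zip Q.tail).all (fun p => p.2 == p.1 + 1)) = true ↔ Q.IsChain (fun a b => b = a + 1) := by
  induction Q with
  | nil => simp
  | cons a t ih =>
    cases t with
    | nil => simp
    | cons b t' =>
      simp only [List.tail_cons, List.zip_cons_cons, List.all_cons, Bool.and_eq_true, beq_iff_eq,
        List.isChain_cons_cons]
      rw [← ih]
      constructor
      · rintro ⟨h1, h2⟩; exact ⟨h1, h2⟩
      · rintro ⟨h1, h2⟩; exact ⟨h1, h2⟩

theorem pvGap (Q : List Int) (hst : ∀ i : Nat, ∀ _ : i + 1 < Q.length, Q[i] < Q[i + 1]) :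
    ∀ d i : Nat, ∀ _ : i + d < Q.length, Q[i] + d ≤ Q[i + d] := by
  intro d
  induction d with
  | zero => intro i h; simp
  | succ n ih =>
    intro i h
    have h1 := ih i (by omega)
    have h2 := hst (i + n) (by omega)
    have h3 : Q[i + (n + 1)] = Q[(i + n) + 1] := rfl
    rw [h3]
    push_cast
    omega

theorem pvGap2 (Q : List Int) (hst : ∀ i : Nat, ∀ _ : i + 1 < Q.length, Q[i] < Q[i + 1]) :
    ∀ i j : Nat, ∀ hij : i ≤ j, ∀ hj : j < Q.length, Q[i]'(Nat.lt_of_le_of_lt hij hj) + ((j : Int) - i) ≤ Q[j] := by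
  intro i j hij hj
  have h := pvGap Q hst (j - i) i (by omega)
  simp only [show i + (j - i) = j from by omega] at h
  push_cast [Nat.cast_sub hij] at h
  omega

theorem pvChain_iff (P Q : List Int) (hperm : Q.Perm P) (hsort : Q.Pairwise (· ≤ ·))
    (hne : P ≠ []) (mx mn : Int)
    (hmx : PySem.List.max? P (fun x => x) = some mx)
    (hmn : PySem.List.min? P (fun x => x) = some mn) :
    (Q.IsChain (fun a b => b = a + 1) ↔ (P.Nodup ∧ mx - mn = (P.length : Int) - 1)) := by
  have hlen : Q.length = P.length := hperm.length_eq
  have hQne : Q ≠ [] := fun h => hne (by rw [h] at hperm; exact hperm.nil_eq.symm ▸ rfl)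
  have hn : 0 < Q.length := List.length_pos_iff.mpr hQne
  have hmemQP : ∀ x, x ∈ Q ↔ x ∈ P := fun x => hperm.mem_iff
  have hmxU : ∀ y ∈ P, y ≤ mx := PySem.List.max?_isMax hmx
  have hmnL : ∀ y ∈ P, mn ≤ y := PySem.List.min?_isMin hmn
  have hmxm : mx ∈ P := PySem.List.max?_mem hmx
  have hmnm : mn ∈ P := PySem.List.min?_mem hmn
  constructor
  · intro hchain
    rw [List.isChain_iff_getElem] at hchain
    have hval : ∀ k : Nat, ∀ _ : k < Q.length, Q[k] = Q[0] + k := by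
      intro k
      induction k with
      | zero => intro h; simp
      | succ j ih =>
        intro h
        have := hchain j (by omega)
        have hj := ih (by omega)
        rw [this, hj]
        push_cast
        ring_nf
    have hlt : Q.Pairwise (· < ·) := by
      rw [List.pairwise_iff_getElem]
      intro i j hi hj hij
      rw [hval i hi, hval j hj]
      omega
    have hndQ : Q.Nodup := hlt.imp (fun h => ne_of_lt h)
    refine ⟨hperm.nodup hndQ, ?_⟩
    have hlast : Q[Q.length - 1] = Q[0] + (Q.length - 1 : Nat) := hval _ (by omega)
    -- mx = Q[0] + (n-1)
    obtain ⟨k, hk, hkq⟩ := List.mem_iff_getElem.mp ((hmemQP mx).mpr hmxm)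
    have hmx1 : mx ≤ Q[0] + ((Q.length : Int) - 1) := by
      rw [← hkq, hval k hk]; omega
    have hmx2 : Q[0] + ((Q.length : Int) - 1) ≤ mx := by
      have := hmxU _ ((hmemQP Q[Q.length - 1]).mp (List.getElem_mem _))
      rw [hlast] at this; omega
    obtain ⟨k', hk', hkq'⟩ := List.mem_iff_getElem.mp ((hmemQP mn).mpr hmnm)
    have hmn1 : Q[0] ≤ mn := by rw [← hkq', hval k' hk']; omega
    have hmn2 : mn ≤ Q[0] := hmnL _ ((hmemQP Q[0]).mp (List.getElem_mem _))
    rw [← hlen]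
    omega
  · rintro ⟨hndP, hspan⟩
    have hndQ : Q.Nodup := hperm.nodup_iff.mpr hndP
    have hle : ∀ i j : Nat, ∀ _ : i < Q.length, ∀ _ : j < Q.length, i < j → Q[i] ≤ Q[j] := by
      intro i j hi hj hij
      exact List.pairwise_iff_getElem.mp hsort i j hi hj hij
    have hst : ∀ i : Nat, ∀ _ : i + 1 < Q.length, Q[i] < Q[i + 1] := by
      intro i h
      have h1 := hle i (i+1) (by omega) h (by omega)
      have h2 : Q[i] ≠ Q[i+1] := by
        intro he
        have := (List.Nodup.getElem_inj_iff hndQ).mp he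
        omega
      omega
    have hgap := pvGap2 Q hst
    -- Q[0] = mn
    obtain ⟨k', hk', hkq'⟩ := List.mem_iff_getElem.mp ((hmemQP mn).mpr hmnm)
    have hQ0mn : Q[0] = mn := by
      have h1 : mn ≤ Q[0] := hmnL _ ((hmemQP Q[0]).mp (List.getElem_mem _))
      have h2 : Q[0] ≤ Q[k'] := by
        have := hgap 0 k' (by omega) hk'
        omega
      omega
    obtain ⟨k, hk, hkq⟩ := List.mem_iff_getElem.mp ((hmemQP mx).mpr hmxm)
    have hQlast : Q[Q.length - 1] = mx := by
      have h1 : Q[Q.length - 1] ≤ mx := hmxU _ ((hmemQP Q[Q.length - 1]).mp (List.getElem_mem _))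
      have h2 : Q[k] ≤ Q[Q.length - 1] := by
        have := hgap k (Q.length - 1) (by omega) (by omega)
        omega
      omega
    rw [List.isChain_iff_getElem]
    intro i hi
    have g1 := hgap 0 i (by omega) (by omega)
    have g2 := hgap (i+1) (Q.length - 1) (by omega) (by omega)
    have step := hst i hi
    have hlenQ : (Q.length : Int) = (P.length : Int) := by exact_mod_cast hlen
    rw [hQlast] at g2
    rw [hQ0mn] at g1
    omega

-- the token comparison: A's set-size test equals B's compare-to-first
theorem pvTok_eq (subset order_w : List String) (t : String → String)
    (hmem : ∀ w, w ∈ order_w ↔ w ∈ subset) (a : String) (rest : List String)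
    (hsub : subset = a :: rest) (hne : order_w ≠ []) :
    (((PySem.Set.ofList (order_w.map t)).length == 1) : Bool)
      = subset.all (fun w => t w == t a) := by
  rw [Bool.eq_iff_iff]
  rw [beq_iff_eq, List.all_eq_true]
  rw [pvSetLen_one_iff _ (by simpa using hne)]
  constructor
  · rintro ⟨c, hc⟩ w hw
    have hw' : t w ∈ order_w.map t := List.mem_map_of_mem ((hmem w).mpr hw)
    have ha' : t a ∈ order_w.map t := List.mem_map_of_mem ((hmem a).mpr (by simp [hsub]))
    rw [beq_iff_eq, hc _ hw', hc _ ha']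
  · intro h
    refine ⟨t a, ?_⟩
    intro x hx
    obtain ⟨w, hw, rfl⟩ := List.mem_map.mp hx
    have := h w ((hmem w).mp hw)
    rwa [beq_iff_eq] at this

theorem pvMain (id_order : List String) (subset : List String) (id_to_tok : List (String × String)) :
    is_consecutive_same_token_py id_order subset id_to_tok = is_consecutive_same_token_py_alt id_order subset id_to_tok := by
  unfold is_consecutive_same_token_py is_consecutive_same_token_py_alt
  by_cases hlen : subset.length < 2
  · simp [hlen]
  · simp only [if_neg hlen]
    set m := pvIdxMap id_order with hm
    by_cases hall : ∀ w ∈ subset, m.contains w = true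
    · -- all present
      have hfil : subset.filter (fun w => m.contains w) = subset := List.filter_eq_self.mpr hall
      rw [hfil, pvCollect_all m subset hall]
      set key : String → Int := fun w => m.getD w 0 with hkey
      set P : List Int := subset.map key with hP
      set ow := PySem.List.sorted subset key false with how
      set Q : List Int := ow.map key with hQ
      have hlow : ow.length = subset.length := PySem.List.length_sorted subset key false
      have hperm : Q.Perm P := (PySem.List.sorted_perm subset key false).map key
      have hsort : Q.Pairwise (· ≤ ·) := PySem.List.sorted_map_key_pairwise subset key
      have hPlen : P.length = subset.length := List.length_map ..
      have hPne : P ≠ [] := by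
        intro h; rw [h] at hPlen; simp at hPlen; omega
      obtain ⟨mx, hmx⟩ : ∃ mx, PySem.List.max? P (fun x => x) = some mx := by
        cases hx : PySem.List.max? P (fun x => x) with
        | none => exact absurd ((PySem.List.max?_eq_none_iff _ _).mp hx) hPne
        | some v => exact ⟨v, rfl⟩
      obtain ⟨mn, hmn⟩ : ∃ mn, PySem.List.min? P (fun x => x) = some mn := by
        cases hx : PySem.List.min? P (fun x => x) with
        | none => exact absurd ((PySem.List.min?_eq_none_iff _ _).mp hx) hPne
        | some v => exact ⟨v, rfl⟩
      rw [if_neg (by omega : ¬ ow.length ≠ subset.length)]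
      dsimp only
      rw [hmx, hmn]
      dsimp only
      have hslice : PySem.List.slice Q (some 1) none = Q.tail := by
        have := PySem.List.slice_from_natCast Q 1
        simpa [List.drop_one] using this
      rw [hslice]
      have hchain := (pvZipAll_iff_chain Q).trans (pvChain_iff P Q hperm hsort hPne mx mn hmx hmn)
      by_cases hnd : P.Nodup
      · by_cases hspan : mx - mn = (P.length : Int) - 1
        · have hcond : ((Q.zip Q.tail).all (fun p => p.2 == p.1 + 1)) = true :=
            hchain.mpr ⟨hnd, hspan⟩
          rw [hcond, if_pos rfl]
          rw [if_neg (fun h => h ((pvSetLen_eq_iff P).mpr hnd))]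
          rw [if_neg (by omega : ¬ mx - mn ≠ (P.length : Int) - 1)]
          -- tokens
          obtain ⟨a, rest, rfl⟩ : ∃ a rest, subset = a :: rest := by
            cases subset with
            | nil => simp at hlen
            | cons a rest => exact ⟨a, rest, rfl⟩
          have hget0 : PySem.List.pyGetD (a :: rest) 0 "" = a := PySem.List.pyGetD_zero_cons _ _ _
          rw [hget0]
          have htoklen : 2 ≤ (ow.map (fun w => (PySem.Dict.ofList id_to_tok).getD w "")).length := by
            rw [List.length_map]; omega
          rw [decide_eq_true htoklen, Bool.true_and]
          exact pvTok_eq (a :: rest) ow (fun w => (PySem.Dict.ofList id_to_tok).getD w "")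
            (fun w => PySem.List.mem_sorted (a :: rest) key false w) a rest rfl
            (by intro h; simp [h] at hlow)
        · have hcond : ((Q.zip Q.tail).all (fun p => p.2 == p.1 + 1)) = false := by
            rw [← Bool.not_eq_true]
            intro h; exact hspan (hchain.mp h).2
          rw [hcond]
          simp only [Bool.false_eq_true, if_false]
          rw [if_neg (fun h => h ((pvSetLen_eq_iff P).mpr hnd))]
          rw [if_pos (by omega : mx - mn ≠ (P.length : Int) - 1)]
      · have hcond : ((Q.zip Q.tail).all (fun p => p.2 == p.1 + 1)) = false := by
          rw [← Bool.not_eq_true]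
          intro h; exact hnd (hchain.mp h).1
        rw [hcond]
        simp only [Bool.false_eq_true, if_false]
        rw [if_pos (fun h => hnd ((pvSetLen_eq_iff P).mp h))]
    · -- some id missing
      push Not at hall
      obtain ⟨w, hw, hcw⟩ := hall
      have hcw' : m.contains w = false := by
        cases h : m.contains w
        · rfl
        · exact absurd h hcw
      have hcoll : pvCollectPositions m subset = none :=
        (pvCollect_none_iff m subset).mpr ⟨w, hw, hcw'⟩
      rw [hcoll]
      have hfl : (subset.filter (fun w => m.contains w)).length ≠ subset.length := by
        intro h
        have := List.length_filter_eq_length_iff.mp h w hw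
        rw [hcw'] at this; cases this
      rw [if_pos (by rw [PySem.List.length_sorted]; exact hfl)]

-- ===== VERDICT (by name: the statement is the Claim_ definition above) =====
theorem is_consecutive_same_token_py_spec : Claim_equal_is_consecutive_same_token_py := by
  intro id_order subset id_to_tok _hdom
  exact pvMain id_order subset id_to_tok
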